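-- pv_equiv track=rewrite | github.com/reynaldocv/leetcode | 2000 - 2999/2245. [Medium] Maximum Trailing Zeros in a Cornered Path.py | maxTrailingZeros
-- ===== SOURCE A (Python) =====
-- from typing import List
--
-- def maxTrailingZeros(grid: List[List[int]]) -> int:
--     def helper(number):
--         cnt2 = 0
--         cnt5 = 0
--
--         while number % 2 == 0:
--             cnt2 += 1
--
--             number //= 2
--
--         while number % 5 == 0:
--             cnt5 += 1
--
--             number //= 5
--
--         return [cnt2, cnt5]
--
--     m, n = len(grid), len(grid[0])
--
--     dp = [[helper(grid[i][j]) for j in range(n)] for i in range(m)]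
--
--     horizontal = [[[num for num in dp[i][j]] for j in range(n)] for i in range(m)]
--     vertical = [[[num for num in dp[i][j]] for j in range(n)] for i in range(m)]
--
--     for i in range(m):
--         for j in range(1, n):
--             horizontal[i][j][0] += horizontal[i][j - 1][0]
--             horizontal[i][j][1] += horizontal[i][j - 1][1]
--
--     for i in range(1, m):
--         for j in range(n):
--             vertical[i][j][0] += vertical[i - 1][j][0]
--             vertical[i][j][1] += vertical[i - 1][j][1]
--
--     ans = 0
--
--     for i in range(m):
--         for j in range(n):
--             up2 = vertical[i][j][0]
--             up5 = vertical[i][j][1]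
--
--             down2 = vertical[-1][j][0] - up2 + dp[i][j][0]
--             down5 = vertical[-1][j][1] - up5 + dp[i][j][1]
--
--             left2 = horizontal[i][j][0] - dp[i][j][0]
--             left5 = horizontal[i][j][1] - dp[i][j][1]
--
--             right2 = horizontal[i][-1][0] - horizontal[i][j][0]
--             right5 = horizontal[i][-1][1] - horizontal[i][j][1]
--
--             ans = max(ans, min(up2 + left2, up5 + left5))
--             ans = max(ans, min(up2 + right2, up5 + right5))
--             ans = max(ans, min(down2 + left2, down5 + left5))
--             ans = max(ans, min(down2 + right2, down5 + right5))
--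
--     return ans
-- ===== SOURCE B (Python) =====
-- def maxTrailingZeros(grid):
--     def count(x, p):
--         c = 0
--         while x % p == 0:
--             c += 1
--             x //= p
--         return c
--
--     m, n = len(grid), len(grid[0])
--     c2 = [[count(grid[i][j], 2) for j in range(n)] for i in range(m)]
--     c5 = [[count(grid[i][j], 5) for j in range(n)] for i in range(m)]
--     best = 0
--     for i in range(m):
--         for j in range(n):
--             left2 = sum(c2[i][l] for l in range(j + 1))
--             left5 = sum(c5[i][l] for l in range(j + 1))
--             right2 = sum(c2[i][l] for l in range(j, n))
--             right5 = sum(c5[i][l] for l in range(j, n))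
--             up2 = sum(c2[k][j] for k in range(i + 1))
--             up5 = sum(c5[k][j] for k in range(i + 1))
--             down2 = sum(c2[k][j] for k in range(i, m))
--             down5 = sum(c5[k][j] for k in range(i, m))
--             for v2, v5 in ((up2, up5), (down2, down5)):
--                 for h2, h5 in ((left2, left5), (right2, right5)):
--                     best = max(best, min(v2 + h2 - c2[i][j], v5 + h5 - c5[i][j]))
--     return best
-- ===== Notes on version B (the rewrite author's own statement) =====
-- stated objective: simpler
-- what changed: A builds mutable horizontal/vertical prefix-sum DP tables of [cnt2,cnt5] pairs and reconstructs the four directional sums by total-minus-prefix arithmetic; B keeps two scalar factor grids and, for each cell, computes the four inclusive directional sums directly as plain sums over the row/column segments, combining each corner as horizontal+vertical-pivot.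
import Mathlib
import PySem

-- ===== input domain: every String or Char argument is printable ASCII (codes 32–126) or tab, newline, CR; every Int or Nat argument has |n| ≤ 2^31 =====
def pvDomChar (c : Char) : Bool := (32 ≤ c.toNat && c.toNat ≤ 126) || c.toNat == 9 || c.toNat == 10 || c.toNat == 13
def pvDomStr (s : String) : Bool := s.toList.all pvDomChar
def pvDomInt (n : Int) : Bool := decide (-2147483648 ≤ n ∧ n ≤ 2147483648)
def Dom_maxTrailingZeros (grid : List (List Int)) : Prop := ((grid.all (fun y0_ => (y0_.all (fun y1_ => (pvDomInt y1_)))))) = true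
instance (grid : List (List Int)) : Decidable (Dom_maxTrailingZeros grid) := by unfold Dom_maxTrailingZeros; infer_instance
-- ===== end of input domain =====

-- B replaces A's mutable horizontal/vertical prefix-table DP with per-cell direct directional
-- sums over two scalar factor grids (simpler decomposition, not faster; return values agree on Pre_).

-- ===== PORT A =====
-- helper's first while loop: strip factors of 2, returning (count, remainder).
-- The natAbs-decrease conjunct is a pure totality guard: it holds whenever the Python
-- loop makes progress (number ≠ 0), and Python diverges at number = 0 (excluded by Pre_).
def pvStrip2 (x : Int) : Int × Int :=
  if h : PySem.Int.mod x 2 = 0 ∧ (PySem.Int.floordiv x 2).natAbs < x.natAbs then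
    let r := pvStrip2 (PySem.Int.floordiv x 2)
    (r.1 + 1, r.2)
  else (0, x)
termination_by x.natAbs
decreasing_by exact h.2

-- helper's second while loop: strip factors of 5 (same totality guard).
def pvStrip5 (x : Int) : Int × Int :=
  if h : PySem.Int.mod x 5 = 0 ∧ (PySem.Int.floordiv x 5).natAbs < x.natAbs then
    let r := pvStrip5 (PySem.Int.floordiv x 5)
    (r.1 + 1, r.2)
  else (0, x)
termination_by x.natAbs
decreasing_by exact h.2

-- helper(number) = [cnt2, cnt5], as a pair
def pvHelper (number : Int) : Int × Int :=
  let a := pvStrip2 number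
  let b := pvStrip5 a.2
  (a.1, b.1)

-- t[i][j] (Python indexing, negative indices from the end; default only outside Pre_)
def pvCell (t : List (List (Int × Int))) (i j : Int) : Int × Int :=
  PySem.List.pyGetD (PySem.List.pyGetD t i []) j (0, 0)

-- t[i][j] = v
def pvSetCell (t : List (List (Int × Int))) (i j : Int) (v : Int × Int) :
    List (List (Int × Int)) :=
  PySem.List.pySetD t i (PySem.List.pySetD (PySem.List.pyGetD t i []) j v) 

def pvM (grid : List (List Int)) : Int := grid.length
def pvN (grid : List (List Int)) : Int := (PySem.List.pyGetD grid 0 []).length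

def pvDP (grid : List (List Int)) : List (List (Int × Int)) :=
  (PySem.List.pyRange 0 (pvM grid) 1).map (fun i =>
    (PySem.List.pyRange 0 (pvN grid) 1).map (fun j =>
      pvHelper (PySem.List.pyGetD (PySem.List.pyGetD grid i []) j 0)))

-- horizontal = [[[num for num in dp[i][j]] …]] (a fresh copy of dp)
def pvH0 (grid : List (List Int)) : List (List (Int × Int)) :=
  (PySem.List.pyRange 0 (pvM grid) 1).map (fun i =>
    (PySem.List.pyRange 0 (pvN grid) 1).map (fun j => pvCell (pvDP grid) i j))

-- vertical = [[[num for num in dp[i][j]] …]] (a second fresh copy)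
def pvV0 (grid : List (List Int)) : List (List (Int × Int)) :=
  (PySem.List.pyRange 0 (pvM grid) 1).map (fun i =>
    (PySem.List.pyRange 0 (pvN grid) 1).map (fun j => pvCell (pvDP grid) i j))

-- for i in range(m): for j in range(1, n): horizontal[i][j][·] += horizontal[i][j-1][·]
def pvH (grid : List (List Int)) : List (List (Int × Int)) :=
  (PySem.List.pyRange 0 (pvM grid) 1).foldl (fun H i =>
    (PySem.List.pyRange 1 (pvN grid) 1).foldl (fun H j =>
      pvSetCell H i j
        ((pvCell H i j).1 + (pvCell H i (j - 1)).1,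
         (pvCell H i j).2 + (pvCell H i (j - 1)).2)) H) (pvH0 grid)

-- for i in range(1, m): for j in range(n): vertical[i][j][·] += vertical[i-1][j][·]
def pvV (grid : List (List Int)) : List (List (Int × Int)) :=
  (PySem.List.pyRange 1 (pvM grid) 1).foldl (fun V i =>
    (PySem.List.pyRange 0 (pvN grid) 1).foldl (fun V j =>
      pvSetCell V i j
        ((pvCell V i j).1 + (pvCell V (i - 1) j).1,
         (pvCell V i j).2 + (pvCell V (i - 1) j).2)) V) (pvV0 grid)

def maxTrailingZeros (grid : List (List Int)) : Int :=
  (PySem.List.pyRange 0 (pvM grid) 1).foldl (fun ans i =>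
    (PySem.List.pyRange 0 (pvN grid) 1).foldl (fun ans j =>
      let up2 := (pvCell (pvV grid) i j).1
      let up5 := (pvCell (pvV grid) i j).2
      let down2 := (pvCell (pvV grid) (-1) j).1 - up2 + (pvCell (pvDP grid) i j).1
      let down5 := (pvCell (pvV grid) (-1) j).2 - up5 + (pvCell (pvDP grid) i j).2
      let left2 := (pvCell (pvH grid) i j).1 - (pvCell (pvDP grid) i j).1
      let left5 := (pvCell (pvH grid) i j).2 - (pvCell (pvDP grid) i j).2
      let right2 := (pvCell (pvH grid) i (-1)).1 - (pvCell (pvH grid) i j).1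
      let right5 := (pvCell (pvH grid) i (-1)).2 - (pvCell (pvH grid) i j).2
      let ans := max ans (min (up2 + left2) (up5 + left5))
      let ans := max ans (min (up2 + right2) (up5 + right5))
      let ans := max ans (min (down2 + left2) (down5 + left5))
      max ans (min (down2 + right2) (down5 + right5))) ans) 0

-- ===== PORT B =====
-- count(x, p): number of times p divides x (same totality guard as A's while loops)
def pvCount (p x : Int) : Int :=
  if h : PySem.Int.mod x p = 0 ∧ (PySem.Int.floordiv x p).natAbs < x.natAbs then
    pvCount p (PySem.Int.floordiv x p) + 1
  else 0
termination_by x.natAbs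
decreasing_by exact h.2

def pvC2 (grid : List (List Int)) : List (List Int) :=
  (PySem.List.pyRange 0 (pvM grid) 1).map (fun i =>
    (PySem.List.pyRange 0 (pvN grid) 1).map (fun j =>
      pvCount 2 (PySem.List.pyGetD (PySem.List.pyGetD grid i []) j 0)))

def pvC5 (grid : List (List Int)) : List (List Int) :=
  (PySem.List.pyRange 0 (pvM grid) 1).map (fun i =>
    (PySem.List.pyRange 0 (pvN grid) 1).map (fun j =>
      pvCount 5 (PySem.List.pyGetD (PySem.List.pyGetD grid i []) j 0)))

-- c[i][j]
def pvAt (t : List (List Int)) (i j : Int) : Int :=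
  PySem.List.pyGetD (PySem.List.pyGetD t i []) j 0

def maxTrailingZeros_alt (grid : List (List Int)) : Int :=
  let c2 := pvC2 grid
  let c5 := pvC5 grid
  (PySem.List.pyRange 0 (pvM grid) 1).foldl (fun best i =>
    (PySem.List.pyRange 0 (pvN grid) 1).foldl (fun best j =>
      let left2 := (PySem.List.pyRange 0 (j + 1) 1).foldl (fun s l => s + pvAt c2 i l) 0
      let left5 := (PySem.List.pyRange 0 (j + 1) 1).foldl (fun s l => s + pvAt c5 i l) 0
      let right2 := (PySem.List.pyRange j (pvN grid) 1).foldl (fun s l => s + pvAt c2 i l) 0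
      let right5 := (PySem.List.pyRange j (pvN grid) 1).foldl (fun s l => s + pvAt c5 i l) 0
      let up2 := (PySem.List.pyRange 0 (i + 1) 1).foldl (fun s k => s + pvAt c2 k j) 0
      let up5 := (PySem.List.pyRange 0 (i + 1) 1).foldl (fun s k => s + pvAt c5 k j) 0
      let down2 := (PySem.List.pyRange i (pvM grid) 1).foldl (fun s k => s + pvAt c2 k j) 0
      let down5 := (PySem.List.pyRange i (pvM grid) 1).foldl (fun s k => s + pvAt c5 k j) 0
      [(up2, up5), (down2, down5)].foldl (fun best vp =>
        [(left2, left5), (right2, right5)].foldl (fun best hp =>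
          max best (min (vp.1 + hp.1 - pvAt c2 i j) (vp.2 + hp.2 - pvAt c5 i j))) best) best)
    best) 0

-- ===== PRECONDITION & SPEC =====
-- Pre_ excludes exactly the inputs where Python A does not return: the empty grid
-- (grid[0] raises IndexError), ragged grids with some row shorter than row 0
-- (IndexError), and grids with a zero among the first len(grid[0]) entries of a row
-- (helper's `while number % 2 == 0` diverges at 0).
def Pre_maxTrailingZeros (grid : List (List Int)) : Prop :=
  grid ≠ [] ∧ ∀ row ∈ grid,
    (grid.getD 0 []).length ≤ row.length ∧
    ∀ x ∈ row.take (grid.getD 0 []).length, x ≠ 0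
instance (grid : List (List Int)) : Decidable (Pre_maxTrailingZeros grid) := by
  unfold Pre_maxTrailingZeros; infer_instance

def pvWitness_maxTrailingZeros : List (List Int) := [[4, 25], [10, 10]]

def Spec_maxTrailingZeros (grid : List (List Int)) (out : Int) : Prop := out = maxTrailingZeros_alt grid
instance (grid : List (List Int)) (out : Int) : Decidable (Spec_maxTrailingZeros grid out) := by unfold Spec_maxTrailingZeros; infer_instance

-- ===== CLAIM (what is proved, stated in full; the proofs are below) =====
def Claim_equal_maxTrailingZeros : Prop := ∀ (grid : List (List Int)), Dom_maxTrailingZeros grid → Pre_maxTrailingZeros grid → Spec_maxTrailingZeros grid (maxTrailingZeros grid)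

-- ===== LEMMAS AND PROOFS =====
theorem pvCount_pos {p x : Int} (h1 : PySem.Int.mod x p = 0)
    (h2 : (PySem.Int.floordiv x p).natAbs < x.natAbs) :
    pvCount p x = pvCount p (PySem.Int.floordiv x p) + 1 := by
  conv_lhs => rw [pvCount]
  rw [dif_pos ⟨h1, h2⟩]

theorem pvCount_neg {p x : Int}
    (h : ¬(PySem.Int.mod x p = 0 ∧ (PySem.Int.floordiv x p).natAbs < x.natAbs)) :
    pvCount p x = 0 := by
  conv_lhs => rw [pvCount]
  rw [dif_neg h]

theorem pvStrip2_fst (x : Int) : (pvStrip2 x).1 = pvCount 2 x := by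
  fun_induction pvStrip2 x with
  | case1 x h r ih => rw [pvCount_pos h.1 h.2]; exact congrArg (· + 1) ih
  | case2 x h => rw [pvCount_neg h]

theorem pv_floordiv_mul_left (b y : Int) (hb : 0 < b) : PySem.Int.floordiv (b * y) b = y := by
  rw [PySem.Int.floordiv_eq_iff_of_pos hb]
  constructor <;> nlinarith

theorem pvCount5_double (y : Int) (hy : y ≠ 0) : pvCount 5 (2 * y) = pvCount 5 y := by
  induction hn : y.natAbs using Nat.strong_induction_on generalizing y with
  | _ N ih =>
  subst hn
  by_cases h5 : (5:Int) ∣ y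
  · obtain ⟨z, rfl⟩ := h5
    have hz : z ≠ 0 := by rintro rfl; simp at hy
    have e1 : (2:Int) * (5 * z) = 5 * (2 * z) := by ring
    have d1 : PySem.Int.floordiv (2 * (5 * z)) 5 = 2 * z := by
      rw [e1]; exact pv_floordiv_mul_left 5 (2*z) (by norm_num)
    have d2 : PySem.Int.floordiv (5 * z) 5 = z := pv_floordiv_mul_left 5 z (by norm_num)
    have m1 : PySem.Int.mod (2 * (5 * z)) 5 = 0 := by
      rw [PySem.Int.mod_eq_zero_iff_dvd]; exact ⟨2 * z, e1⟩
    have m2 : PySem.Int.mod (5 * z) 5 = 0 := by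
      rw [PySem.Int.mod_eq_zero_iff_dvd]; exact ⟨z, rfl⟩
    have hza : z.natAbs ≠ 0 := by simpa using hz
    rw [pvCount_pos m1 (by rw [d1]; simp [Int.natAbs_mul]; omega)]
    rw [pvCount_pos m2 (by rw [d2]; simp [Int.natAbs_mul]; omega)]
    rw [d1, d2]
    have := ih z.natAbs (by simp [Int.natAbs_mul]; omega) z hz rfl
    omega
  · have h5' : ¬ (5:Int) ∣ 2 * y := by omega
    rw [pvCount_neg (by rw [PySem.Int.mod_eq_zero_iff_dvd]; tauto)]
    rw [pvCount_neg (by rw [PySem.Int.mod_eq_zero_iff_dvd]; tauto)]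

theorem pvCount5_strip2 (x : Int) : pvCount 5 (pvStrip2 x).2 = pvCount 5 x := by
  fun_induction pvStrip2 x with
  | case1 x h r ih =>
    have hx : x ≠ 0 := by rintro rfl; revert h; decide
    obtain ⟨y, rfl⟩ := (PySem.Int.mod_eq_zero_iff_dvd x 2).mp h.1
    have hy : y ≠ 0 := by rintro rfl; simp at hx
    have d : PySem.Int.floordiv (2 * y) 2 = y := pv_floordiv_mul_left 2 y (by norm_num)
    show pvCount 5 (pvStrip2 (PySem.Int.floordiv (2 * y) 2)).2 = pvCount 5 (2 * y)
    rw [d]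
    rw [d] at ih
    exact ih.trans (pvCount5_double y hy).symm
  | case2 x h => rfl

theorem pvStrip5_fst (x : Int) : (pvStrip5 x).1 = pvCount 5 x := by
  fun_induction pvStrip5 x with
  | case1 x h r ih => rw [pvCount_pos h.1 h.2]; exact congrArg (· + 1) ih
  | case2 x h => rw [pvCount_neg h]

theorem pvHelper_eq (x : Int) : pvHelper x = (pvCount 2 x, pvCount 5 x) := by
  unfold pvHelper
  refine Prod.ext ?_ ?_
  · exact pvStrip2_fst x
  · show (pvStrip5 (pvStrip2 x).2).1 = pvCount 5 x
    rw [pvStrip5_fst]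
    exact pvCount5_strip2 x

-- table shape
def pvShape (t : List (List (Int × Int))) (m n : Nat) : Prop :=
  t.length = m ∧ ∀ r ∈ t, r.length = n

-- Ico partial sums
def pvPS (f : Nat → Int) (a b : Nat) : Int := ∑ l ∈ Finset.Ico a b, f l

theorem pvCell_natCast (t : List (List (Int × Int))) (i j : Nat) :
    pvCell t (i : Int) (j : Int) = (t.getD i []).getD j (0, 0) := by
  simp [pvCell]

theorem pvSetCell_natCast (t : List (List (Int × Int))) (i j : Nat) (v : Int × Int) :
    pvSetCell t (i : Int) (j : Int) v = t.set i ((t.getD i []).set j v) := by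
  simp [pvSetCell]

theorem pvRowLen {t : List (List (Int × Int))} {m n : Nat} (h : pvShape t m n)
    {i : Nat} (hi : i < m) : (t.getD i []).length = n := by
  have hl : i < t.length := h.1 ▸ hi
  rw [List.getD_eq_getElem t [] hl]
  exact h.2 _ (List.getElem_mem hl)

theorem pvShape_set {t : List (List (Int × Int))} {m n : Nat} (h : pvShape t m n)
    {i : Nat} {r : List (Int × Int)} (hr : r.length = n) : pvShape (t.set i r) m n := by
  refine ⟨by simp [h.1], fun r' hr' => ?_⟩
  rcases List.mem_or_eq_of_mem_set hr' with h' | h'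
  · exact h.2 _ h'
  · rw [h']; exact hr

theorem pvCell_set {t : List (List (Int × Int))} {m n : Nat} (h : pvShape t m n)
    {i j : Nat} (hi : i < m) (hj : j < n) (v : Int × Int) (i' j' : Nat) :
    pvCell (pvSetCell t (i : Int) (j : Int) v) (i' : Int) (j' : Int) =
      if i' = i ∧ j' = j then v else pvCell t (i' : Int) (j' : Int) := by
  have hil : i < t.length := h.1 ▸ hi
  have hrl : (t.getD i []).length = n := pvRowLen h hi
  rw [pvSetCell_natCast, pvCell_natCast, pvCell_natCast]
  rw [List.getD_eq_getElem?_getD] at hrl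
  rw [List.getD_eq_getElem?_getD, List.getD_eq_getElem?_getD]
  by_cases hii : i' = i
  · subst hii
    rw [List.getElem?_set_self hil]
    simp only [Option.getD_some]
    rw [List.getD_eq_getElem?_getD]
    by_cases hjj : j' = j
    · subst hjj
      rw [List.getElem?_set_self (by omega)]
      simp
    · rw [List.getElem?_set_ne (by omega)]
      simp [hjj, List.getD_eq_getElem?_getD]
  · rw [List.getElem?_set_ne (by omega)]
    simp [hii, List.getD_eq_getElem?_getD]

theorem pvPS_empty (f : Nat → Int) (a : Nat) : pvPS f a a = 0 := by simp [pvPS]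

theorem pvPS_succ (f : Nat → Int) (a b : Nat) (h : a ≤ b) :
    pvPS f a (b + 1) = pvPS f a b + f b := Finset.sum_Ico_succ_top h f

-- the inner loop body of A's horizontal sweep (definitionally the lambda in pvH)
def pvHstep (i : Int) (H : List (List (Int × Int))) (j : Int) : List (List (Int × Int)) :=
  pvSetCell H i j
    ((pvCell H i j).1 + (pvCell H i (j - 1)).1,
     (pvCell H i j).2 + (pvCell H i (j - 1)).2)

-- the inner loop body of A's vertical sweep
def pvVstep (i : Int) (V : List (List (Int × Int))) (j : Int) : List (List (Int × Int)) :=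
  pvSetCell V i j
    ((pvCell V i j).1 + (pvCell V (i - 1) j).1,
     (pvCell V i j).2 + (pvCell V (i - 1) j).2)

theorem pvHrow (m n i : Nat) (him : i < m) (T : List (List (Int × Int))) (hT : pvShape T m n) :
    ∀ k, k ≤ n →
      pvShape ((PySem.List.pyRange 1 (k : Int) 1).foldl (pvHstep (i : Int)) T) m n ∧
      ∀ i' j' : Nat, j' < n →
        pvCell ((PySem.List.pyRange 1 (k : Int) 1).foldl (pvHstep (i : Int)) T) (i' : Int) (j' : Int) =
          if i' = i ∧ j' < k then
            (pvPS (fun l => (pvCell T (i : Int) (l : Int)).1) 0 (j' + 1),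
             pvPS (fun l => (pvCell T (i : Int) (l : Int)).2) 0 (j' + 1))
          else pvCell T (i' : Int) (j' : Int) := by
  intro k
  induction k with
  | zero =>
    intro _
    rw [PySem.List.pyRange_one_eq_nil (by norm_num)]
    refine ⟨hT, fun i' j' hj' => ?_⟩
    simp
  | succ k ih =>
    intro hk1
    obtain ⟨ihS, ihC⟩ := ih (by omega)
    by_cases hk0 : k = 0
    · subst hk0
      rw [PySem.List.pyRange_one_eq_nil (by norm_num)]
      refine ⟨hT, fun i' j' hj' => ?_⟩
      split_ifs with hc
      · obtain ⟨rfl, hj0⟩ := hc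
        have : j' = 0 := by omega
        subst this
        rw [pvPS_succ _ 0 0 le_rfl, pvPS_empty, pvPS_succ _ 0 0 le_rfl, pvPS_empty]
        simp
      · rfl
    · have hk1' : 1 ≤ k := by omega
      have hsplit : PySem.List.pyRange 1 ((k + 1 : Nat) : Int) 1 =
          PySem.List.pyRange 1 (k : Int) 1 ++ [(k : Int)] := by
        push_cast
        exact PySem.List.pyRange_one_succ_right (by omega)
      rw [hsplit, List.foldl_append, List.foldl_cons, List.foldl_nil]
      set R := (PySem.List.pyRange 1 (k : Int) 1).foldl (pvHstep (i : Int)) T with hR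
      have hc1 : ((k : Int) - 1) = ((k - 1 : Nat) : Int) := by push_cast [hk1']; ring
      have hkn : k < n := by omega
      have hcellk : pvCell R (i : Int) (k : Int) = pvCell T (i : Int) (k : Int) := by
        rw [ihC i k hkn]; simp
      have hcellk1 : pvCell R (i : Int) ((k : Int) - 1) =
          (pvPS (fun l => (pvCell T (i : Int) (l : Int)).1) 0 k,
           pvPS (fun l => (pvCell T (i : Int) (l : Int)).2) 0 k) := by
        rw [hc1, ihC i (k - 1) (by omega)]
        rw [if_pos ⟨rfl, by omega⟩, Nat.sub_add_cancel hk1']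
      have hstep : pvHstep (i : Int) R (k : Int) =
          pvSetCell R (i : Int) (k : Int)
            ((pvCell T (i : Int) (k : Int)).1 + pvPS (fun l => (pvCell T (i : Int) (l : Int)).1) 0 k,
             (pvCell T (i : Int) (k : Int)).2 + pvPS (fun l => (pvCell T (i : Int) (l : Int)).2) 0 k) := by
        rw [pvHstep, hcellk, hcellk1]
      rw [hstep]
      have hsetshape : ∀ v, pvShape (pvSetCell R (i : Int) (k : Int) v) m n := fun v => by
        rw [pvSetCell_natCast]
        exact pvShape_set ihS (by rw [List.length_set]; exact pvRowLen ihS him)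
      refine ⟨hsetshape _, fun i' j' hj' => ?_⟩
      rw [pvCell_set ihS him hkn _ i' j']
      by_cases hii : i' = i
      · subst hii
        by_cases hjk : j' = k
        · subst hjk
          rw [if_pos ⟨rfl, rfl⟩, if_pos ⟨rfl, by omega⟩]
          rw [pvPS_succ _ 0 j' (by omega), pvPS_succ _ 0 j' (by omega)]
          refine Prod.ext ?_ ?_ <;> simp [add_comm]
        · rw [if_neg (by tauto), ihC i' j' hj']
          by_cases hjlt : j' < k
          · rw [if_pos ⟨rfl, hjlt⟩, if_pos ⟨rfl, by omega⟩]
          · rw [if_neg (by omega), if_neg (by omega)]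
      · rw [if_neg (by tauto), ihC i' j' hj', if_neg (by tauto), if_neg (by tauto)]

theorem pvVrow (m n i : Nat) (him : i < m) (hi1 : 1 ≤ i) (T : List (List (Int × Int)))
    (hT : pvShape T m n) :
    ∀ k, k ≤ n →
      pvShape ((PySem.List.pyRange 0 (k : Int) 1).foldl (pvVstep (i : Int)) T) m n ∧
      ∀ i' j' : Nat, j' < n →
        pvCell ((PySem.List.pyRange 0 (k : Int) 1).foldl (pvVstep (i : Int)) T) (i' : Int) (j' : Int) =
          if i' = i ∧ j' < k then
            ((pvCell T (i : Int) (j' : Int)).1 + (pvCell T ((i - 1 : Nat) : Int) (j' : Int)).1,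
             (pvCell T (i : Int) (j' : Int)).2 + (pvCell T ((i - 1 : Nat) : Int) (j' : Int)).2)
          else pvCell T (i' : Int) (j' : Int) := by
  intro k
  induction k with
  | zero =>
    intro _
    rw [PySem.List.pyRange_one_eq_nil (by norm_num)]
    refine ⟨hT, fun i' j' hj' => ?_⟩
    simp
  | succ k ih =>
    intro hk1
    obtain ⟨ihS, ihC⟩ := ih (by omega)
    have hsplit : PySem.List.pyRange 0 ((k + 1 : Nat) : Int) 1 =
        PySem.List.pyRange 0 (k : Int) 1 ++ [(k : Int)] := by
      push_cast
      exact PySem.List.pyRange_one_succ_right (by omega)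
    rw [hsplit, List.foldl_append, List.foldl_cons, List.foldl_nil]
    set R := (PySem.List.pyRange 0 (k : Int) 1).foldl (pvVstep (i : Int)) T with hR
    have hc1 : ((i : Int) - 1) = ((i - 1 : Nat) : Int) := by push_cast [hi1]; ring
    have hkn : k < n := by omega
    have hcellk : pvCell R (i : Int) (k : Int) = pvCell T (i : Int) (k : Int) := by
      rw [ihC i k hkn]; simp
    have hcellk1 : pvCell R ((i : Int) - 1) (k : Int) =
        pvCell T ((i - 1 : Nat) : Int) (k : Int) := by
      rw [hc1, ihC (i - 1) k hkn, if_neg (by omega)]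
    have hstep : pvVstep (i : Int) R (k : Int) =
        pvSetCell R (i : Int) (k : Int)
          ((pvCell T (i : Int) (k : Int)).1 + (pvCell T ((i - 1 : Nat) : Int) (k : Int)).1,
           (pvCell T (i : Int) (k : Int)).2 + (pvCell T ((i - 1 : Nat) : Int) (k : Int)).2) := by
      rw [pvVstep, hcellk, hcellk1]
    rw [hstep]
    have hsetshape : ∀ v, pvShape (pvSetCell R (i : Int) (k : Int) v) m n := fun v => by
      rw [pvSetCell_natCast]
      exact pvShape_set ihS (by rw [List.length_set]; exact pvRowLen ihS him)
    refine ⟨hsetshape _, fun i' j' hj' => ?_⟩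
    rw [pvCell_set ihS him hkn _ i' j']
    by_cases hii : i' = i
    · subst hii
      by_cases hjk : j' = k
      · subst hjk
        rw [if_pos ⟨rfl, rfl⟩, if_pos ⟨rfl, by omega⟩]
      · rw [if_neg (by tauto), ihC i' j' hj']
        by_cases hjlt : j' < k
        · rw [if_pos ⟨rfl, hjlt⟩, if_pos ⟨rfl, by omega⟩]
        · rw [if_neg (by omega), if_neg (by omega)]
    · rw [if_neg (by tauto), ihC i' j' hj', if_neg (by tauto), if_neg (by tauto)]

def pvMn (grid : List (List Int)) : Nat := grid.length
def pvNn (grid : List (List Int)) : Nat := (PySem.List.pyGetD grid 0 ([] : List Int)).length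

theorem pvM_def (grid : List (List Int)) : pvM grid = ((pvMn grid : Nat) : Int) := rfl
theorem pvN_def (grid : List (List Int)) : pvN grid = ((pvNn grid : Nat) : Int) := rfl

def pvF2 (grid : List (List Int)) (i j : Nat) : Int :=
  pvCount 2 (PySem.List.pyGetD (PySem.List.pyGetD grid (i : Int) []) (j : Int) 0)
def pvF5 (grid : List (List Int)) (i j : Nat) : Int :=
  pvCount 5 (PySem.List.pyGetD (PySem.List.pyGetD grid (i : Int) []) (j : Int) 0)

theorem pvPS_congr {f g : Nat → Int} {a b : Nat} (h : ∀ l, a ≤ l → l < b → f l = g l) :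
    pvPS f a b = pvPS g a b :=
  Finset.sum_congr rfl fun l hl => h l (Finset.mem_Ico.mp hl).1 (Finset.mem_Ico.mp hl).2

theorem pvTable_shape (m n : Nat) (F : Int → Int → Int × Int) :
    pvShape ((PySem.List.pyRange 0 (m : Int) 1).map (fun i =>
      (PySem.List.pyRange 0 (n : Int) 1).map (fun j => F i j))) m n := by
  constructor
  · simp [PySem.List.length_pyRange_one]
  · intro r hr
    obtain ⟨i, _, rfl⟩ := List.mem_map.mp hr
    simp [PySem.List.length_pyRange_one]

theorem pvTable_cell (m n : Nat) (F : Int → Int → Int × Int) (i j : Nat) (hi : i < m) (hj : j < n) :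
    pvCell ((PySem.List.pyRange 0 (m : Int) 1).map (fun i =>
      (PySem.List.pyRange 0 (n : Int) 1).map (fun j => F i j))) (i : Int) (j : Int) = F i j := by
  unfold pvCell
  rw [PySem.List.pyGetD_map_pyRange _ m i [] hi]
  rw [PySem.List.pyGetD_map_pyRange _ n j (0, 0) hj]

theorem pvDP_cell (grid : List (List Int)) (i j : Nat) (hi : i < pvMn grid) (hj : j < pvNn grid) :
    pvCell (pvDP grid) (i : Int) (j : Int) = (pvF2 grid i j, pvF5 grid i j) := by
  rw [pvDP, pvM_def, pvN_def, pvTable_cell _ _ _ i j hi hj, pvHelper_eq]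
  rfl

theorem pvH0_shape (grid : List (List Int)) : pvShape (pvH0 grid) (pvMn grid) (pvNn grid) := by
  rw [pvH0, pvM_def, pvN_def]; exact pvTable_shape _ _ _

theorem pvH0_cell (grid : List (List Int)) (i j : Nat) (hi : i < pvMn grid) (hj : j < pvNn grid) :
    pvCell (pvH0 grid) (i : Int) (j : Int) = (pvF2 grid i j, pvF5 grid i j) := by
  rw [pvH0, pvM_def, pvN_def, pvTable_cell _ _ _ i j hi hj]
  exact pvDP_cell grid i j hi hj

theorem pvV0_shape (grid : List (List Int)) : pvShape (pvV0 grid) (pvMn grid) (pvNn grid) := by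
  rw [pvV0, pvM_def, pvN_def]; exact pvTable_shape _ _ _

theorem pvV0_cell (grid : List (List Int)) (i j : Nat) (hi : i < pvMn grid) (hj : j < pvNn grid) :
    pvCell (pvV0 grid) (i : Int) (j : Int) = (pvF2 grid i j, pvF5 grid i j) := by
  rw [pvV0, pvM_def, pvN_def, pvTable_cell _ _ _ i j hi hj]
  exact pvDP_cell grid i j hi hj

theorem pvHfold (grid : List (List Int)) : ∀ k, k ≤ pvMn grid →
    pvShape ((PySem.List.pyRange 0 (k : Int) 1).foldl
      (fun H i => (PySem.List.pyRange 1 (pvN grid) 1).foldl (pvHstep i) H) (pvH0 grid))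
      (pvMn grid) (pvNn grid) ∧
    ∀ i' j' : Nat, i' < pvMn grid → j' < pvNn grid →
      pvCell ((PySem.List.pyRange 0 (k : Int) 1).foldl
        (fun H i => (PySem.List.pyRange 1 (pvN grid) 1).foldl (pvHstep i) H) (pvH0 grid))
        (i' : Int) (j' : Int) =
        if i' < k then
          (pvPS (fun l => pvF2 grid i' l) 0 (j' + 1), pvPS (fun l => pvF5 grid i' l) 0 (j' + 1))
        else pvCell (pvH0 grid) (i' : Int) (j' : Int) := by
  intro k
  induction k with
  | zero =>
    intro _
    rw [PySem.List.pyRange_one_eq_nil (show ((0 : Nat) : Int) ≤ 0 by simp), List.foldl_nil]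
    exact ⟨pvH0_shape grid, fun i' j' _ _ => by simp⟩
  | succ k ih =>
    intro hk1
    obtain ⟨ihS, ihC⟩ := ih (by omega)
    have hsplit : PySem.List.pyRange 0 ((k + 1 : Nat) : Int) 1 =
        PySem.List.pyRange 0 (k : Int) 1 ++ [(k : Int)] := by
      push_cast
      exact PySem.List.pyRange_one_succ_right (by omega)
    rw [hsplit, List.foldl_append, List.foldl_cons, List.foldl_nil]
    set R := (PySem.List.pyRange 0 (k : Int) 1).foldl
      (fun H i => (PySem.List.pyRange 1 (pvN grid) 1).foldl (pvHstep i) H) (pvH0 grid) with hR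
    rw [pvN_def]
    obtain ⟨rS, rC⟩ := pvHrow (pvMn grid) (pvNn grid) k (by omega) R ihS (pvNn grid) le_rfl
    refine ⟨rS, fun i' j' hi' hj' => ?_⟩
    rw [rC i' j' hj']
    have hrowk : ∀ l, 0 ≤ l → l < j' + 1 →
        (fun l => (pvCell R (k : Int) (l : Int)).1) l = (fun l => pvF2 grid k l) l := by
      intro l _ hl
      simp only []
      rw [ihC k l (by omega) (by omega), if_neg (by omega), pvH0_cell grid k l (by omega) (by omega)]
    have hrowk5 : ∀ l, 0 ≤ l → l < j' + 1 →
        (fun l => (pvCell R (k : Int) (l : Int)).2) l = (fun l => pvF5 grid k l) l := by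
      intro l _ hl
      simp only []
      rw [ihC k l (by omega) (by omega), if_neg (by omega), pvH0_cell grid k l (by omega) (by omega)]
    by_cases hii : i' = k
    · subst hii
      rw [if_pos ⟨rfl, hj'⟩, if_pos (by omega)]
      rw [pvPS_congr hrowk, pvPS_congr hrowk5]
    · rw [if_neg (by tauto), ihC i' j' hi' hj']
      by_cases hlt : i' < k
      · rw [if_pos hlt, if_pos (by omega)]
      · rw [if_neg hlt, if_neg (by omega)]

theorem pvVfold (grid : List (List Int)) : ∀ k, 1 ≤ k → k ≤ pvMn grid →
    pvShape ((PySem.List.pyRange 1 (k : Int) 1).foldl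
      (fun V i => (PySem.List.pyRange 0 (pvN grid) 1).foldl (pvVstep i) V) (pvV0 grid))
      (pvMn grid) (pvNn grid) ∧
    ∀ i' j' : Nat, i' < pvMn grid → j' < pvNn grid →
      pvCell ((PySem.List.pyRange 1 (k : Int) 1).foldl
        (fun V i => (PySem.List.pyRange 0 (pvN grid) 1).foldl (pvVstep i) V) (pvV0 grid))
        (i' : Int) (j' : Int) =
        if i' < k then
          (pvPS (fun t => pvF2 grid t j') 0 (i' + 1), pvPS (fun t => pvF5 grid t j') 0 (i' + 1))
        else pvCell (pvV0 grid) (i' : Int) (j' : Int) := by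
  intro k hk1
  induction k, hk1 using Nat.le_induction with
  | base =>
    intro hm
    rw [PySem.List.pyRange_one_eq_nil (show ((1 : Nat) : Int) ≤ 1 by simp), List.foldl_nil]
    refine ⟨pvV0_shape grid, fun i' j' hi' hj' => ?_⟩
    split_ifs with hc
    · have : i' = 0 := by omega
      subst this
      rw [pvPS_succ _ 0 0 le_rfl, pvPS_empty, pvPS_succ _ 0 0 le_rfl, pvPS_empty,
        pvV0_cell grid 0 j' (by omega) hj']
      simp
    · rfl
  | succ k hk1' ih =>
    intro hkm
    obtain ⟨ihS, ihC⟩ := ih (by omega)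
    have hsplit : PySem.List.pyRange 1 ((k + 1 : Nat) : Int) 1 =
        PySem.List.pyRange 1 (k : Int) 1 ++ [(k : Int)] := by
      push_cast
      exact PySem.List.pyRange_one_succ_right (by omega)
    rw [hsplit, List.foldl_append, List.foldl_cons, List.foldl_nil]
    set R := (PySem.List.pyRange 1 (k : Int) 1).foldl
      (fun V i => (PySem.List.pyRange 0 (pvN grid) 1).foldl (pvVstep i) V) (pvV0 grid) with hR
    rw [pvN_def]
    obtain ⟨rS, rC⟩ := pvVrow (pvMn grid) (pvNn grid) k (by omega) hk1' R ihS (pvNn grid) le_rfl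
    refine ⟨rS, fun i' j' hi' hj' => ?_⟩
    rw [rC i' j' hj']
    by_cases hii : i' = k
    · subst hii
      rw [if_pos ⟨rfl, hj'⟩, if_pos (by omega)]
      rw [ihC i' j' hi' hj', if_neg (by omega), ihC (i' - 1) j' (by omega) hj',
        if_pos (by omega), pvV0_cell grid i' j' hi' hj']
      have e1 : i' - 1 + 1 = i' := by omega
      rw [e1, pvPS_succ _ 0 i' (by omega), pvPS_succ _ 0 i' (by omega)]
      refine Prod.ext ?_ ?_ <;> simp [add_comm]
    · rw [if_neg (by tauto), ihC i' j' hi' hj']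
      by_cases hlt : i' < k
      · rw [if_pos hlt, if_pos (by omega)]
      · rw [if_neg hlt, if_neg (by omega)]

theorem pvH_fold_eq (grid : List (List Int)) : pvH grid =
    (PySem.List.pyRange 0 ((pvMn grid : Nat) : Int) 1).foldl
      (fun H i => (PySem.List.pyRange 1 (pvN grid) 1).foldl (pvHstep i) H) (pvH0 grid) := rfl

theorem pvV_fold_eq (grid : List (List Int)) : pvV grid =
    (PySem.List.pyRange 1 ((pvMn grid : Nat) : Int) 1).foldl
      (fun V i => (PySem.List.pyRange 0 (pvN grid) 1).foldl (pvVstep i) V) (pvV0 grid) := rfl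

theorem pvH_shape (grid : List (List Int)) : pvShape (pvH grid) (pvMn grid) (pvNn grid) := by
  rw [pvH_fold_eq]
  exact (pvHfold grid (pvMn grid) le_rfl).1

theorem pvH_cell (grid : List (List Int)) (i j : Nat) (hi : i < pvMn grid) (hj : j < pvNn grid) :
    pvCell (pvH grid) (i : Int) (j : Int) =
      (pvPS (fun l => pvF2 grid i l) 0 (j + 1), pvPS (fun l => pvF5 grid i l) 0 (j + 1)) := by
  rw [pvH_fold_eq, (pvHfold grid (pvMn grid) le_rfl).2 i j hi hj, if_pos hi]

theorem pvV_shape (grid : List (List Int)) (hm : 1 ≤ pvMn grid) :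
    pvShape (pvV grid) (pvMn grid) (pvNn grid) := by
  rw [pvV_fold_eq]
  exact (pvVfold grid (pvMn grid) hm le_rfl).1

theorem pvV_cell (grid : List (List Int)) (i j : Nat) (hi : i < pvMn grid) (hj : j < pvNn grid) :
    pvCell (pvV grid) (i : Int) (j : Int) =
      (pvPS (fun t => pvF2 grid t j) 0 (i + 1), pvPS (fun t => pvF5 grid t j) 0 (i + 1)) := by
  rw [pvV_fold_eq, (pvVfold grid (pvMn grid) (by omega) le_rfl).2 i j hi hj, if_pos hi]

theorem pvCell_neg_row {t : List (List (Int × Int))} {m n : Nat} (h : pvShape t m n)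
    (hm : 0 < m) (j : Int) : pvCell t (-1) j = pvCell t ((m - 1 : Nat) : Int) j := by
  have hne : t ≠ [] := by
    intro hnil
    rw [hnil] at h
    simp [pvShape] at h
    omega
  have hlen : t.length = m := h.1
  unfold pvCell
  rw [PySem.List.pyGetD_neg_one t [] hne, PySem.List.pyGetD_natCast,
    List.getLast_eq_getElem hne, List.getD_eq_getElem t [] (by omega)]
  congr 2
  omega

theorem pvCell_last_col {t : List (List (Int × Int))} {m n : Nat} (h : pvShape t m n)
    {i : Nat} (hi : i < m) (hn : 0 < n) :
    pvCell t (i : Int) (-1) = pvCell t (i : Int) ((n - 1 : Nat) : Int) := by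
  have hrl : (PySem.List.pyGetD t (i : Int) []).length = n := by
    rw [PySem.List.pyGetD_natCast]
    exact pvRowLen h hi
  have hne : PySem.List.pyGetD t (i : Int) [] ≠ [] := by
    intro hnil
    rw [hnil] at hrl
    simp at hrl
    omega
  unfold pvCell
  set r := PySem.List.pyGetD t (i : Int) [] with hr
  rw [PySem.List.pyGetD_neg_one r (0, 0) hne, PySem.List.pyGetD_natCast,
    List.getLast_eq_getElem hne, List.getD_eq_getElem r (0, 0) (by omega)]
  congr 1
  omega

theorem pvMap2_at (m n : Nat) (F : Int → Int → Int) (i j : Nat) (hi : i < m) (hj : j < n) :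
    pvAt ((PySem.List.pyRange 0 (m : Int) 1).map (fun i =>
      (PySem.List.pyRange 0 (n : Int) 1).map (fun j => F i j))) (i : Int) (j : Int) = F i j := by
  unfold pvAt
  rw [PySem.List.pyGetD_map_pyRange _ m i [] hi]
  rw [PySem.List.pyGetD_map_pyRange _ n j 0 hj]

theorem pvC2_at (grid : List (List Int)) (i j : Nat) (hi : i < pvMn grid) (hj : j < pvNn grid) :
    pvAt (pvC2 grid) (i : Int) (j : Int) = pvF2 grid i j := by
  rw [pvC2, pvM_def, pvN_def]
  exact pvMap2_at _ _ _ i j hi hj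

theorem pvC5_at (grid : List (List Int)) (i j : Nat) (hi : i < pvMn grid) (hj : j < pvNn grid) :
    pvAt (pvC5 grid) (i : Int) (j : Int) = pvF5 grid i j := by
  rw [pvC5, pvM_def, pvN_def]
  exact pvMap2_at _ _ _ i j hi hj

theorem pvSumEq (φ : Int → Int) (ψ : Nat → Int) (a b : Nat) (aI bI : Int)
    (ha : aI = (a : Int)) (hb : bI = (b : Int))
    (hcong : ∀ l : Nat, a ≤ l → l < b → φ (l : Int) = ψ l) :
    (PySem.List.pyRange aI bI 1).foldl (fun s l => s + φ l) 0 = pvPS ψ a b := by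
  subst ha hb
  rw [PySem.List.foldl_add, PySem.List.pyRange_one, List.map_map]
  have hc : ((b : Int) - (a : Int)).toNat = b - a := by omega
  rw [hc]
  have hbridge : ((List.range (b - a)).map (φ ∘ fun k : Nat => (a : Int) + (k : Int))).sum =
      ∑ k ∈ Finset.range (b - a), φ ((a : Int) + (k : Int)) := rfl
  rw [zero_add, hbridge, pvPS, Finset.sum_Ico_eq_sum_range]
  refine Finset.sum_congr rfl fun k hk => ?_
  have hk' : k < b - a := Finset.mem_range.mp hk
  have : ((a : Int) + (k : Int)) = ((a + k : Nat) : Int) := by push_cast; ring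
  rw [this, hcong (a + k) (by omega) (by omega)]

set_option maxHeartbeats 2000000 in
theorem pv_main (grid : List (List Int)) (hpre : Pre_maxTrailingZeros grid) :
    maxTrailingZeros grid = maxTrailingZeros_alt grid := by
  have hm1 : 1 ≤ pvMn grid := by
    have : grid.length ≠ 0 := fun h => hpre.1 (List.eq_nil_of_length_eq_zero h)
    unfold pvMn
    omega
  simp only [maxTrailingZeros, maxTrailingZeros_alt]
  refine List.foldl_ext _ _ _ ?_
  intro ans iI hiI
  obtain ⟨h0i, hiM⟩ := PySem.List.mem_pyRange_one.mp hiI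
  obtain ⟨i, rfl⟩ : ∃ i : Nat, iI = (i : Int) := ⟨iI.toNat, (Int.toNat_of_nonneg h0i).symm⟩
  have hi : i < pvMn grid := by rw [pvM_def] at hiM; exact_mod_cast hiM
  refine List.foldl_ext _ _ _ ?_
  intro a jI hjI
  obtain ⟨h0j, hjN⟩ := PySem.List.mem_pyRange_one.mp hjI
  obtain ⟨j, rfl⟩ : ∃ j : Nat, jI = (j : Int) := ⟨jI.toNat, (Int.toNat_of_nonneg h0j).symm⟩
  have hj : j < pvNn grid := by rw [pvN_def] at hjN; exact_mod_cast hjN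
  -- A-side cell values, componentwise
  have hH := pvH_cell grid i j hi hj
  have hV := pvV_cell grid i j hi hj
  have hdp := pvDP_cell grid i j hi hj
  have hVlast : pvCell (pvV grid) (-1) (j : Int) =
      (pvPS (fun t => pvF2 grid t j) 0 (pvMn grid),
       pvPS (fun t => pvF5 grid t j) 0 (pvMn grid)) := by
    rw [pvCell_neg_row (pvV_shape grid hm1) (by omega) _,
      pvV_cell grid (pvMn grid - 1) j (by omega) hj, Nat.sub_add_cancel hm1]
  have hHlast : pvCell (pvH grid) (i : Int) (-1) =
      (pvPS (fun l => pvF2 grid i l) 0 (pvNn grid),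
       pvPS (fun l => pvF5 grid i l) 0 (pvNn grid)) := by
    rw [pvCell_last_col (pvH_shape grid) hi (by omega),
      pvH_cell grid i (pvNn grid - 1) hi (by omega), Nat.sub_add_cancel (by omega)]
  have hV1 : (pvCell (pvV grid) (i : Int) (j : Int)).1 = pvPS (fun t => pvF2 grid t j) 0 (i + 1) := by rw [hV]
  have hV2 : (pvCell (pvV grid) (i : Int) (j : Int)).2 = pvPS (fun t => pvF5 grid t j) 0 (i + 1) := by rw [hV]
  have hVl1 : (pvCell (pvV grid) (-1) (j : Int)).1 = pvPS (fun t => pvF2 grid t j) 0 (pvMn grid) := by rw [hVlast]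
  have hVl2 : (pvCell (pvV grid) (-1) (j : Int)).2 = pvPS (fun t => pvF5 grid t j) 0 (pvMn grid) := by rw [hVlast]
  have hH1 : (pvCell (pvH grid) (i : Int) (j : Int)).1 = pvPS (fun l => pvF2 grid i l) 0 (j + 1) := by rw [hH]
  have hH2 : (pvCell (pvH grid) (i : Int) (j : Int)).2 = pvPS (fun l => pvF5 grid i l) 0 (j + 1) := by rw [hH]
  have hHl1 : (pvCell (pvH grid) (i : Int) (-1)).1 = pvPS (fun l => pvF2 grid i l) 0 (pvNn grid) := by rw [hHlast]
  have hHl2 : (pvCell (pvH grid) (i : Int) (-1)).2 = pvPS (fun l => pvF5 grid i l) 0 (pvNn grid) := by rw [hHlast]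
  have hdp1 : (pvCell (pvDP grid) (i : Int) (j : Int)).1 = pvF2 grid i j := by rw [hdp]
  have hdp2 : (pvCell (pvDP grid) (i : Int) (j : Int)).2 = pvF5 grid i j := by rw [hdp]
  -- B-side lookups and sums
  have hat2 := pvC2_at grid i j hi hj
  have hat5 := pvC5_at grid i j hi hj
  have hbl2 : (PySem.List.pyRange 0 ((j : Int) + 1) 1).foldl
      (fun s l => s + pvAt (pvC2 grid) (i : Int) l) 0 = pvPS (fun l => pvF2 grid i l) 0 (j + 1) :=
    pvSumEq _ _ 0 (j + 1) 0 ((j : Int) + 1) (by simp) (by push_cast; ring)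
      (fun l _ hl => pvC2_at grid i l hi (by omega))
  have hbl5 : (PySem.List.pyRange 0 ((j : Int) + 1) 1).foldl
      (fun s l => s + pvAt (pvC5 grid) (i : Int) l) 0 = pvPS (fun l => pvF5 grid i l) 0 (j + 1) :=
    pvSumEq _ _ 0 (j + 1) 0 ((j : Int) + 1) (by simp) (by push_cast; ring)
      (fun l _ hl => pvC5_at grid i l hi (by omega))
  have hbr2 : (PySem.List.pyRange (j : Int) (pvN grid) 1).foldl
      (fun s l => s + pvAt (pvC2 grid) (i : Int) l) 0 = pvPS (fun l => pvF2 grid i l) j (pvNn grid) :=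
    pvSumEq _ _ j (pvNn grid) (j : Int) (pvN grid) rfl (pvN_def grid)
      (fun l _ hl => pvC2_at grid i l hi hl)
  have hbr5 : (PySem.List.pyRange (j : Int) (pvN grid) 1).foldl
      (fun s l => s + pvAt (pvC5 grid) (i : Int) l) 0 = pvPS (fun l => pvF5 grid i l) j (pvNn grid) :=
    pvSumEq _ _ j (pvNn grid) (j : Int) (pvN grid) rfl (pvN_def grid)
      (fun l _ hl => pvC5_at grid i l hi hl)
  have hbu2 : (PySem.List.pyRange 0 ((i : Int) + 1) 1).foldl
      (fun s k => s + pvAt (pvC2 grid) k (j : Int)) 0 = pvPS (fun t => pvF2 grid t j) 0 (i + 1) :=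
    pvSumEq _ _ 0 (i + 1) 0 ((i : Int) + 1) (by simp) (by push_cast; ring)
      (fun t _ ht => pvC2_at grid t j (by omega) hj)
  have hbu5 : (PySem.List.pyRange 0 ((i : Int) + 1) 1).foldl
      (fun s k => s + pvAt (pvC5 grid) k (j : Int)) 0 = pvPS (fun t => pvF5 grid t j) 0 (i + 1) :=
    pvSumEq _ _ 0 (i + 1) 0 ((i : Int) + 1) (by simp) (by push_cast; ring)
      (fun t _ ht => pvC5_at grid t j (by omega) hj)
  have hbd2 : (PySem.List.pyRange (i : Int) (pvM grid) 1).foldl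
      (fun s k => s + pvAt (pvC2 grid) k (j : Int)) 0 = pvPS (fun t => pvF2 grid t j) i (pvMn grid) :=
    pvSumEq _ _ i (pvMn grid) (i : Int) (pvM grid) rfl (pvM_def grid)
      (fun t _ ht => pvC2_at grid t j ht hj)
  have hbd5 : (PySem.List.pyRange (i : Int) (pvM grid) 1).foldl
      (fun s k => s + pvAt (pvC5 grid) k (j : Int)) 0 = pvPS (fun t => pvF5 grid t j) i (pvMn grid) :=
    pvSumEq _ _ i (pvMn grid) (i : Int) (pvM grid) rfl (pvM_def grid)
      (fun t _ ht => pvC5_at grid t j ht hj)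
  -- sum splits
  have hs1 : pvPS (fun l => pvF2 grid i l) 0 (pvNn grid) =
      pvPS (fun l => pvF2 grid i l) 0 (j + 1) + pvPS (fun l => pvF2 grid i l) (j + 1) (pvNn grid) := by
    unfold pvPS; exact (Finset.sum_Ico_consecutive _ (by omega) (by omega)).symm
  have hs1' : pvPS (fun l => pvF5 grid i l) 0 (pvNn grid) =
      pvPS (fun l => pvF5 grid i l) 0 (j + 1) + pvPS (fun l => pvF5 grid i l) (j + 1) (pvNn grid) := by
    unfold pvPS; exact (Finset.sum_Ico_consecutive _ (by omega) (by omega)).symm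
  have hs2 : pvPS (fun l => pvF2 grid i l) j (pvNn grid) =
      pvF2 grid i j + pvPS (fun l => pvF2 grid i l) (j + 1) (pvNn grid) := by
    unfold pvPS; exact Finset.sum_eq_sum_Ico_succ_bot (by omega) _
  have hs2' : pvPS (fun l => pvF5 grid i l) j (pvNn grid) =
      pvF5 grid i j + pvPS (fun l => pvF5 grid i l) (j + 1) (pvNn grid) := by
    unfold pvPS; exact Finset.sum_eq_sum_Ico_succ_bot (by omega) _
  have hc1 : pvPS (fun t => pvF2 grid t j) 0 (pvMn grid) =
      pvPS (fun t => pvF2 grid t j) 0 (i + 1) + pvPS (fun t => pvF2 grid t j) (i + 1) (pvMn grid) := by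
    unfold pvPS; exact (Finset.sum_Ico_consecutive _ (by omega) (by omega)).symm
  have hc1' : pvPS (fun t => pvF5 grid t j) 0 (pvMn grid) =
      pvPS (fun t => pvF5 grid t j) 0 (i + 1) + pvPS (fun t => pvF5 grid t j) (i + 1) (pvMn grid) := by
    unfold pvPS; exact (Finset.sum_Ico_consecutive _ (by omega) (by omega)).symm
  have hc2 : pvPS (fun t => pvF2 grid t j) i (pvMn grid) =
      pvF2 grid i j + pvPS (fun t => pvF2 grid t j) (i + 1) (pvMn grid) := by
    unfold pvPS; exact Finset.sum_eq_sum_Ico_succ_bot (by omega) _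
  have hc2' : pvPS (fun t => pvF5 grid t j) i (pvMn grid) =
      pvF5 grid i j + pvPS (fun t => pvF5 grid t j) (i + 1) (pvMn grid) := by
    unfold pvPS; exact Finset.sum_eq_sum_Ico_succ_bot (by omega) _
  simp only [List.foldl_cons, List.foldl_nil, hV1, hV2, hVl1, hVl2, hH1, hH2, hHl1, hHl2,
    hdp1, hdp2, hat2, hat5, hbl2, hbl5, hbr2, hbr5, hbu2, hbu5, hbd2, hbd5]
  revert hs1 hs1' hs2 hs2' hc1 hc1' hc2 hc2'
  generalize pvPS (fun l => pvF2 grid i l) 0 (j + 1) = P2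
  generalize pvPS (fun l => pvF5 grid i l) 0 (j + 1) = P5
  generalize pvPS (fun l => pvF2 grid i l) (j + 1) (pvNn grid) = X2
  generalize pvPS (fun l => pvF5 grid i l) (j + 1) (pvNn grid) = X5
  generalize pvPS (fun l => pvF2 grid i l) j (pvNn grid) = R2
  generalize pvPS (fun l => pvF5 grid i l) j (pvNn grid) = R5
  generalize pvPS (fun l => pvF2 grid i l) 0 (pvNn grid) = T2
  generalize pvPS (fun l => pvF5 grid i l) 0 (pvNn grid) = T5
  generalize pvPS (fun t => pvF2 grid t j) 0 (i + 1) = U2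
  generalize pvPS (fun t => pvF5 grid t j) 0 (i + 1) = U5
  generalize pvPS (fun t => pvF2 grid t j) (i + 1) (pvMn grid) = Y2
  generalize pvPS (fun t => pvF5 grid t j) (i + 1) (pvMn grid) = Y5
  generalize pvPS (fun t => pvF2 grid t j) i (pvMn grid) = D2
  generalize pvPS (fun t => pvF5 grid t j) i (pvMn grid) = D5
  generalize pvPS (fun t => pvF2 grid t j) 0 (pvMn grid) = C2
  generalize pvPS (fun t => pvF5 grid t j) 0 (pvMn grid) = C5
  generalize pvF2 grid i j = F2
  generalize pvF5 grid i j = F5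
  intro h1 h2 h3 h4 h5 h6 h7 h8
  refine congrArg₂ max (congrArg₂ max (congrArg₂ max (congrArg₂ max rfl ?_) ?_) ?_) ?_ <;>
    exact congrArg₂ min (by omega) (by omega)

theorem maxTrailingZeros_spec : Claim_equal_maxTrailingZeros := by
  intro grid _ hpre
  unfold Spec_maxTrailingZeros
  exact pv_main grid hpre
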